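-- pv_equiv track=rewrite | github.com/FlorianWi89/Bachelorarbeit | Evaluation/utils.py | evaluate_fault_detection
-- ===== SOURCE A (Python) =====
-- def evaluate_fault_detection(faults_time_pred, faults_time_truth, tol=10, false_alarms_tol=2, use_intervals=True):
--     false_alarms = 0
--     faults_detected = 0
--     faults_not_detected = 0
--
--     # Extract intervals in which a fault is present
--     intervals = []
--     i = 0
--     t0 = faults_time_truth[i]
--     while i < len(faults_time_truth)-1:
--         if faults_time_truth[i + 1] != faults_time_truth[i] + 1:
--             intervals.append((t0, faults_time_truth[i]))
--             t0 = faults_time_truth[i + 1]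
--         if not (i + 1 < len(faults_time_truth)-1):
--             intervals.append((t0, faults_time_truth[i+1]))
--
--         i += 1
--
--     # Check for false alarms
--     for i in range(len(faults_time_pred)):
--         t = faults_time_pred[i]
--         b = False
--         for dt in faults_time_truth:
--             if dt - tol <= t and t <= dt + tol:
--                 b = True
--                 break
--         if b is False:  # False alarm
--             if i + false_alarms_tol <= len(faults_time_pred)-1:    # Need a minimum of number of continous alarms for triggering a "real alarm" -- ignore noise!
--                 if all([t + j == faults_time_pred[i+j] for j in range(false_alarms_tol)]):
--                     false_alarms += 1
--
--     # Check for detected and undetected faults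
--     if use_intervals:
--         for t0, t1 in intervals:
--             b = False
--             for t in faults_time_pred:
--                 if t0 <= t and t <= t1: # TODO: Use tolerance?
--                     b = True
--                     faults_detected += 1
--                     break
--
--             if b is False:
--                 faults_not_detected += 1
--     else:
--         for dt in faults_time_truth:
--             b = False
--             for t in faults_time_pred:
--                 if dt - tol <= t and t <= dt + tol:
--                     b = True
--                     faults_detected += 1
--                     break
--             if b is False:
--                 faults_not_detected += 1
--
--     return {"false_positives": false_alarms, "true_positives": faults_detected, "false_negatives": faults_not_detected}
-- ===== SOURCE B (Python) =====
-- def _bisect_left(a, x):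
--     # standard bisect_left loop (hand-rolled: no imports in this module)
--     lo, hi = 0, len(a)
--     while lo < hi:
--         mid = (lo + hi) // 2
--         if a[mid] < x:
--             lo = mid + 1
--         else:
--             hi = mid
--     return lo
--
--
-- def _has_in_range(a, lo, hi):
--     # a sorted ascending: is there an element y of a with lo <= y <= hi?
--     i = _bisect_left(a, lo)
--     return i < len(a) and a[i] <= hi
--
--
-- def _runs(xs):
--     # maximal runs of consecutive integers, as (first, last) pairs, in order
--     out = []
--     if xs:
--         t0 = prev = xs[0]
--         for v in xs[1:]:
--             if v != prev + 1:
--                 out.append((t0, prev))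
--                 t0 = v
--             prev = v
--         out.append((t0, prev))
--     return out
--
--
-- def evaluate_fault_detection(faults_time_pred, faults_time_truth, tol=10, false_alarms_tol=2, use_intervals=True):
--     n = len(faults_time_pred)
--     st = sorted(faults_time_truth)
--     sp = sorted(faults_time_pred)
--
--     # run[i] = length of the maximal consecutive chain pred[i], pred[i]+1, ... inside pred
--     run = [1] * n
--     for i in range(n - 2, -1, -1):
--         if faults_time_pred[i + 1] == faults_time_pred[i] + 1:
--             run[i] = run[i + 1] + 1
--
--     false_alarms = 0
--     for i in range(n):
--         t = faults_time_pred[i]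
--         if not _has_in_range(st, t - tol, t + tol):
--             if i + false_alarms_tol <= n - 1 and (false_alarms_tol <= 0 or run[i] >= false_alarms_tol):
--                 false_alarms += 1
--
--     faults_detected = 0
--     faults_not_detected = 0
--     if use_intervals:
--         for t0, t1 in _runs(faults_time_truth):
--             if _has_in_range(sp, t0, t1):
--                 faults_detected += 1
--             else:
--                 faults_not_detected += 1
--     else:
--         for dt in faults_time_truth:
--             if _has_in_range(sp, dt - tol, dt + tol):
--                 faults_detected += 1
--             else:
--                 faults_not_detected += 1
--
--     return {"false_positives": false_alarms, "true_positives": faults_detected, "false_negatives": faults_not_detected}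
-- ===== Notes on version B (the rewrite author's own statement) =====
-- stated objective: faster
-- what changed: Sorts both lists once and answers every range-membership query by binary search, replaces the per-index consecutive-alarm rescans by a right-to-left run-length DP, and builds the truth intervals by a direct run decomposition instead of A's index-juggling while loop.
-- intended difference: When use_intervals is true and faults_time_truth has exactly one element, A's interval-extraction loop never runs and A reports 0 true positives and 0 false negatives, silently dropping the fault; B treats the single truth time as the interval [t,t] and reports it as detected or missed, which is the intended behaviour. — e.g. on evaluate_fault_detection([], [5], 10, 2, true): A returns [("false_positives", 0), ("true_positives", 0), ("false_negatives", 0)], B returns [("false_positives", 0), ("true_positives", 0), ("false_negatives", 1)]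
-- crash fix: On an empty faults_time_truth A raises IndexError (it reads faults_time_truth[0] unconditionally); B returns the natural counts there (no faults to detect or miss, every prediction an uncovered alarm candidate). — e.g. on evaluate_fault_detection([3], [], 10, 2, true): A raises IndexError, B returns [("false_positives", 0), ("true_positives", 0), ("false_negatives", 0)]
import Mathlib
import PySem

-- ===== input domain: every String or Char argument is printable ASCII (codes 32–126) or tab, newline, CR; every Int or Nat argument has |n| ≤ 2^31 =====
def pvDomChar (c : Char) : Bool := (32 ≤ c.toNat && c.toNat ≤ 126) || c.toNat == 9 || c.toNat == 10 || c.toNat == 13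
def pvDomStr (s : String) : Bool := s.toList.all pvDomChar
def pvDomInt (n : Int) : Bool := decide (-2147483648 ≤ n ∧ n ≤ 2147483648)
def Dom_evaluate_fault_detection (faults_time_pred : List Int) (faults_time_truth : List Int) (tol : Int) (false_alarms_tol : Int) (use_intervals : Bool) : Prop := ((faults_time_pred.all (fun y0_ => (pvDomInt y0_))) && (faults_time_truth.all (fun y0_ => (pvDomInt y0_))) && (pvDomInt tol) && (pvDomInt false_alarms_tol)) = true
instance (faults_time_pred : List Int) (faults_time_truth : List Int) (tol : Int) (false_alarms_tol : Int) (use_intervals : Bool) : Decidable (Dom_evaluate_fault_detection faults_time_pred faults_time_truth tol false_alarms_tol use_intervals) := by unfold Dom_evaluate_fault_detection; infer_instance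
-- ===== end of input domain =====

-- B replaces A's O(P*T) nested scans by sorting once + binary-search range queries (measured by the
-- timing run) and fixes A's dropped singleton-truth interval (stated as D_ below).

-- ===== PORT A =====
-- Port of evaluate_fault_detection from Evaluation/utils.py. All list reads inside the loops use
-- nonnegative in-range indices, so `List.getD i 0` is exact there; the initial read
-- faults_time_truth[0] raises IndexError in Python on an empty list — excluded by Pre_ below.

-- the `while i < len(truth)-1` interval-extraction loop; state (i, t0, intervals), fuel = len(truth)
def pvA_intervalLoop (truth : List Int) : Nat → Nat → Int → List (Int × Int) → List (Int × Int)
  | 0, _, _, acc => acc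
  | fuel + 1, i, t0, acc =>
    if i < truth.length - 1 then
      let a := truth.getD i 0
      let b := truth.getD (i + 1) 0
      let p : List (Int × Int) × Int := if b ≠ a + 1 then (acc ++ [(t0, a)], b) else (acc, t0)
      let acc2 := if ¬ (i + 1 < truth.length - 1) then p.1 ++ [(p.2, b)] else p.1
      pvA_intervalLoop truth fuel (i + 1) p.2 acc2
    else acc

-- the `for i in range(len(pred))` false-alarm loop (inner for-dt-break = List.any)
def pvA_falseAlarms (pred truth : List Int) (tol fat : Int) : Int :=
  (List.range pred.length).foldl
    (fun fa i =>
      let t := pred.getD i 0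
      if ¬ (truth.any fun dt => decide (dt - tol ≤ t) && decide (t ≤ dt + tol)) then
        if (i : Int) + fat ≤ (pred.length : Int) - 1 then
          if (PySem.List.pyRange 0 fat).all fun j => decide (t + j = pred.getD (i + j.toNat) 0) then
            fa + 1
          else fa
        else fa
      else fa)
    0

-- the `for t0, t1 in intervals` loop (inner for-t-break = List.any); state (detected, not_detected)
def pvA_detect (pred : List Int) (ivs : List (Int × Int)) : Int × Int :=
  ivs.foldl
    (fun s iv =>
      if pred.any fun t => decide (iv.1 ≤ t) && decide (t ≤ iv.2) then (s.1 + 1, s.2)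
      else (s.1, s.2 + 1))
    (0, 0)

-- the `for dt in faults_time_truth` loop of the non-interval branch
def pvA_detectPoints (pred truth : List Int) (tol : Int) : Int × Int :=
  truth.foldl
    (fun s dt =>
      if pred.any fun t => decide (dt - tol ≤ t) && decide (t ≤ dt + tol) then (s.1 + 1, s.2)
      else (s.1, s.2 + 1))
    (0, 0)

def evaluate_fault_detection (faults_time_pred : List Int) (faults_time_truth : List Int) (tol : Int) (false_alarms_tol : Int) (use_intervals : Bool) : List (String × Int) :=
  let intervals := pvA_intervalLoop faults_time_truth faults_time_truth.length 0 (faults_time_truth.getD 0 0) []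
  let fa := pvA_falseAlarms faults_time_pred faults_time_truth tol false_alarms_tol
  let d := if use_intervals then pvA_detect faults_time_pred intervals
           else pvA_detectPoints faults_time_pred faults_time_truth tol
  [("false_positives", fa), ("true_positives", d.1), ("false_negatives", d.2)]

-- ===== PORT B =====
-- Port of Source B. Source B's hand-rolled `_bisect_left` is the standard bisect_left lo/hi loop, which is
-- exactly PySem.List.bisectLeft; the backward `run[i]` DP loop is ported as the equivalent
-- right-to-left structural recursion building the same list.

def pvB_hasInRange (a : List Int) (lo hi : Int) : Bool :=
  let i := PySem.List.bisectLeft a lo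
  decide (i < a.length) && decide (a.getD i 0 ≤ hi)

def pvB_runsGo (t0 prev : Int) : List Int → List (Int × Int)
  | [] => [(t0, prev)]
  | v :: rest => if v ≠ prev + 1 then (t0, prev) :: pvB_runsGo v v rest else pvB_runsGo t0 v rest

def pvB_runs : List Int → List (Int × Int)
  | [] => []
  | x :: rest => pvB_runsGo x x rest

def pvB_runLen : List Int → List Nat
  | [] => []
  | [_] => [1]
  | x :: y :: rest =>
    let r := pvB_runLen (y :: rest)
    (if y = x + 1 then r.headD 1 + 1 else 1) :: r

def pvB_falseAlarms (pred st : List Int) (run : List Nat) (tol fat : Int) : Int :=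
  (List.range pred.length).foldl
    (fun fa i =>
      let t := pred.getD i 0
      if ¬ pvB_hasInRange st (t - tol) (t + tol) then
        if (i : Int) + fat ≤ (pred.length : Int) - 1 ∧ (fat ≤ 0 ∨ fat ≤ ((run.getD i 0 : Nat) : Int))
        then fa + 1 else fa
      else fa)
    0

def pvB_count (sp : List Int) (ivs : List (Int × Int)) : Int × Int :=
  ivs.foldl
    (fun s iv => if pvB_hasInRange sp iv.1 iv.2 then (s.1 + 1, s.2) else (s.1, s.2 + 1))
    (0, 0)

def evaluate_fault_detection_alt (faults_time_pred : List Int) (faults_time_truth : List Int) (tol : Int) (false_alarms_tol : Int) (use_intervals : Bool) : List (String × Int) :=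
  let st := PySem.List.sorted faults_time_truth (fun x => x)
  let sp := PySem.List.sorted faults_time_pred (fun x => x)
  let run := pvB_runLen faults_time_pred
  let fa := pvB_falseAlarms faults_time_pred st run tol false_alarms_tol
  let d := if use_intervals then pvB_count sp (pvB_runs faults_time_truth)
           else faults_time_truth.foldl
                  (fun s dt =>
                    if pvB_hasInRange sp (dt - tol) (dt + tol) then (s.1 + 1, s.2)
                    else (s.1, s.2 + 1))
                  (0, 0)
  [("false_positives", fa), ("true_positives", d.1), ("false_negatives", d.2)]

-- ===== PRECONDITION & SPEC =====
-- Pre_ excludes exactly the inputs on which A raises: an empty faults_time_truth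
-- (IndexError at the unconditional read faults_time_truth[0]).
def Pre_evaluate_fault_detection (faults_time_pred : List Int) (faults_time_truth : List Int) (tol : Int) (false_alarms_tol : Int) (use_intervals : Bool) : Prop := faults_time_truth ≠ []
instance (faults_time_pred : List Int) (faults_time_truth : List Int) (tol : Int) (false_alarms_tol : Int) (use_intervals : Bool) : Decidable (Pre_evaluate_fault_detection faults_time_pred faults_time_truth tol false_alarms_tol use_intervals) := by unfold Pre_evaluate_fault_detection; infer_instance

def pvWitness_evaluate_fault_detection : List Int × List Int × Int × Int × Bool := ([1, 2, 10], [1, 2, 3, 8], 2, 2, true)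

-- On an empty faults_time_truth A raises IndexError (it reads faults_time_truth[0] unconditionally);
-- B returns the natural counts there (no faults to detect, every prediction uncovered).
def Raises_evaluate_fault_detection (faults_time_pred : List Int) (faults_time_truth : List Int) (tol : Int) (false_alarms_tol : Int) (use_intervals : Bool) : Prop := faults_time_truth = []
instance (faults_time_pred : List Int) (faults_time_truth : List Int) (tol : Int) (false_alarms_tol : Int) (use_intervals : Bool) : Decidable (Raises_evaluate_fault_detection faults_time_pred faults_time_truth tol false_alarms_tol use_intervals) := by unfold Raises_evaluate_fault_detection; infer_instance
def pvRaiseWitness_evaluate_fault_detection : List Int × List Int × Int × Int × Bool := ([3], [], 10, 2, true)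
def pvRaiseWitnessOut_evaluate_fault_detection : List (String × Int) := [("false_positives", 0), ("true_positives", 0), ("false_negatives", 0)]

-- When use_intervals is true and faults_time_truth has exactly one element, A's interval-extraction
-- loop never runs, so A reports 0 true positives and 0 false negatives, silently dropping the fault;
-- B treats the single truth time as the interval [t, t] and counts it as detected or missed, which is
-- the intended behaviour.
def D_evaluate_fault_detection (faults_time_pred : List Int) (faults_time_truth : List Int) (tol : Int) (false_alarms_tol : Int) (use_intervals : Bool) : Prop := use_intervals = true ∧ faults_time_truth.length = 1
instance (faults_time_pred : List Int) (faults_time_truth : List Int) (tol : Int) (false_alarms_tol : Int) (use_intervals : Bool) : Decidable (D_evaluate_fault_detection faults_time_pred faults_time_truth tol false_alarms_tol use_intervals) := by unfold D_evaluate_fault_detection; infer_instance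

def Spec_evaluate_fault_detection (faults_time_pred : List Int) (faults_time_truth : List Int) (tol : Int) (false_alarms_tol : Int) (use_intervals : Bool) (out : List (String × Int)) : Prop := ¬ D_evaluate_fault_detection faults_time_pred faults_time_truth tol false_alarms_tol use_intervals → out = evaluate_fault_detection_alt faults_time_pred faults_time_truth tol false_alarms_tol use_intervals
instance (faults_time_pred : List Int) (faults_time_truth : List Int) (tol : Int) (false_alarms_tol : Int) (use_intervals : Bool) (out : List (String × Int)) : Decidable (Spec_evaluate_fault_detection faults_time_pred faults_time_truth tol false_alarms_tol use_intervals out) := by unfold Spec_evaluate_fault_detection; infer_instance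

def pvDiffWitness_evaluate_fault_detection : List Int × List Int × Int × Int × Bool := ([], [5], 10, 2, true)
def pvDiffWitnessOut_evaluate_fault_detection : (List (String × Int)) × (List (String × Int)) :=
  ([("false_positives", 0), ("true_positives", 0), ("false_negatives", 0)],
   [("false_positives", 0), ("true_positives", 0), ("false_negatives", 1)])

-- ===== CLAIM =====
def Claim_unchanged_evaluate_fault_detection : Prop := ∀ (faults_time_pred : List Int) (faults_time_truth : List Int) (tol : Int) (false_alarms_tol : Int) (use_intervals : Bool), Dom_evaluate_fault_detection faults_time_pred faults_time_truth tol false_alarms_tol use_intervals → Pre_evaluate_fault_detection faults_time_pred faults_time_truth tol false_alarms_tol use_intervals → Spec_evaluate_fault_detection faults_time_pred faults_time_truth tol false_alarms_tol use_intervals (evaluate_fault_detection faults_time_pred faults_time_truth tol false_alarms_tol use_intervals)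
def Claim_changed_evaluate_fault_detection : Prop := Dom_evaluate_fault_detection (pvDiffWitness_evaluate_fault_detection.1) (pvDiffWitness_evaluate_fault_detection.2.1) (pvDiffWitness_evaluate_fault_detection.2.2.1) (pvDiffWitness_evaluate_fault_detection.2.2.2.1) (pvDiffWitness_evaluate_fault_detection.2.2.2.2) ∧ Pre_evaluate_fault_detection (pvDiffWitness_evaluate_fault_detection.1) (pvDiffWitness_evaluate_fault_detection.2.1) (pvDiffWitness_evaluate_fault_detection.2.2.1) (pvDiffWitness_evaluate_fault_detection.2.2.2.1) (pvDiffWitness_evaluate_fault_detection.2.2.2.2) ∧ D_evaluate_fault_detection (pvDiffWitness_evaluate_fault_detection.1) (pvDiffWitness_evaluate_fault_detection.2.1) (pvDiffWitness_evaluate_fault_detection.2.2.1) (pvDiffWitness_evaluate_fault_detection.2.2.2.1) (pvDiffWitness_evaluate_fault_detection.2.2.2.2) ∧ evaluate_fault_detection (pvDiffWitness_evaluate_fault_detection.1) (pvDiffWitness_evaluate_fault_detection.2.1) (pvDiffWitness_evaluate_fault_detection.2.2.1) (pvDiffWitness_evaluate_fault_detection.2.2.2.1) (pvDiffWitness_evaluate_fault_detection.2.2.2.2)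 = pvDiffWitnessOut_evaluate_fault_detection.1 ∧ evaluate_fault_detection_alt (pvDiffWitness_evaluate_fault_detection.1) (pvDiffWitness_evaluate_fault_detection.2.1) (pvDiffWitness_evaluate_fault_detection.2.2.1) (pvDiffWitness_evaluate_fault_detection.2.2.2.1) (pvDiffWitness_evaluate_fault_detection.2.2.2.2) = pvDiffWitnessOut_evaluate_fault_detection.2 ∧ pvDiffWitnessOut_evaluate_fault_detection.1 ≠ pvDiffWitnessOut_evaluate_fault_detection.2
def Claim_exact_evaluate_fault_detection : Prop := ∀ (faults_time_pred : List Int) (faults_time_truth : List Int) (tol : Int) (false_alarms_tol : Int) (use_intervals : Bool), Dom_evaluate_fault_detection faults_time_pred faults_time_truth tol false_alarms_tol use_intervals → Pre_evaluate_fault_detection faults_time_pred faults_time_truth tol false_alarms_tol use_intervals → D_evaluate_fault_detection faults_time_pred faults_time_truth tol false_alarms_tol use_intervals → evaluate_fault_detection faults_time_pred faults_time_truth tol false_alarms_tol use_intervals ≠ evaluate_fault_detection_alt faults_time_pred faults_time_truth tol false_alarms_tol use_intervals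
def Claim_raises_evaluate_fault_detection : Prop := (∀ (faults_time_pred : List Int) (faults_time_truth : List Int) (tol : Int) (false_alarms_tol : Int) (use_intervals : Bool), Dom_evaluate_fault_detection faults_time_pred faults_time_truth tol false_alarms_tol use_intervals → Raises_evaluate_fault_detection faults_time_pred faults_time_truth tol false_alarms_tol use_intervals → ¬ Pre_evaluate_fault_detection faults_time_pred faults_time_truth tol false_alarms_tol use_intervals) ∧ (Dom_evaluate_fault_detection (pvRaiseWitness_evaluate_fault_detection.1) (pvRaiseWitness_evaluate_fault_detection.2.1) (pvRaiseWitness_evaluate_fault_detection.2.2.1) (pvRaiseWitness_evaluate_fault_detection.2.2.2.1) (pvRaiseWitness_evaluate_fault_detection.2.2.2.2) ∧ Raises_evaluate_fault_detection (pvRaiseWitness_evaluate_fault_detection.1) (pvRaiseWitness_evaluate_fault_detection.2.1) (pvRaiseWitness_evaluate_fault_detection.2.2.1) (pvRaiseWitness_evaluate_fault_detection.2.2.2.1) (pvRaiseWitness_evaluate_fault_detection.2.2.2.2) ∧ evaluate_fault_detection_alt (pvRaiseWitness_evaluate_fault_detection.1) (pvRaiseWitness_evaluate_fault_detection.2.1)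 (pvRaiseWitness_evaluate_fault_detection.2.2.1) (pvRaiseWitness_evaluate_fault_detection.2.2.2.1) (pvRaiseWitness_evaluate_fault_detection.2.2.2.2) = pvRaiseWitnessOut_evaluate_fault_detection)

-- ===== LEMMAS AND PROOFS =====

-- B's binary-search range query on sorted(l) answers A's linear existence scan over l
lemma pv_hasInRange_sorted (l : List Int) (lo hi : Int) :
    pvB_hasInRange (PySem.List.sorted l (fun x => x)) lo hi
      = l.any (fun y => decide (lo ≤ y) && decide (y ≤ hi)) := by
  set s := PySem.List.sorted l (fun x => x) with hs
  have hp : List.Pairwise (fun a b : Int => a ≤ b) s := PySem.List.sorted_pairwise l (fun x => x)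
  have hperm : s.Perm l := PySem.List.sorted_perm l (fun x => x) false
  obtain ⟨hle, hlt, hge⟩ := PySem.List.bisectLeft_spec s lo hp
  set i := PySem.List.bisectLeft s lo with hidef
  have key : pvB_hasInRange s lo hi = true ↔ ∃ y ∈ l, lo ≤ y ∧ y ≤ hi := by
    unfold pvB_hasInRange
    simp only [← hidef, Bool.and_eq_true, decide_eq_true_eq]
    constructor
    · rintro ⟨h1, h2⟩
      refine ⟨s[i]'h1, hperm.mem_iff.mp (List.getElem_mem h1), hge i h1 le_rfl, ?_⟩
      rwa [List.getD_eq_getElem s 0 h1] at h2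
    · rintro ⟨y, hy, hylo, hyhi⟩
      obtain ⟨k, hk, hky⟩ := List.mem_iff_getElem.mp (hperm.mem_iff.mpr hy)
      have hik : i ≤ k := by
        by_contra hc
        exact absurd (hlt k hk (by omega)) (by rw [hky]; omega)
      have h1 : i < s.length := lt_of_le_of_lt hik hk
      refine ⟨h1, ?_⟩
      rw [List.getD_eq_getElem s 0 h1]
      have : s[i] ≤ s[k] := PySem.List.sorted_id_getElem_mono l hik hk
      omega
  have key2 : l.any (fun y => decide (lo ≤ y) && decide (y ≤ hi)) = true ↔ ∃ y ∈ l, lo ≤ y ∧ y ≤ hi := by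
    simp [List.any_eq_true]
  rw [Bool.eq_iff_iff, key, key2]

-- chain-soundness of pvB_runLen's head
lemma pv_runLen_head_sound (l : List Int) (hl : l ≠ []) :
    ∀ j : Nat, j < (pvB_runLen l).headD 1 → j < l.length ∧ l.getD j 0 = l.getD 0 0 + j := by
  induction l with
  | nil => simp at hl
  | cons x rest ih =>
    cases rest with
    | nil => intro j hj; simp [pvB_runLen] at hj; subst hj; simp
    | cons y rest' =>
      intro j hj
      simp only [pvB_runLen, List.headD_cons] at hj
      by_cases hy : y = x + 1
      · rw [if_pos hy] at hj
        cases j with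
        | zero => simp
        | succ k =>
          have hk : k < (pvB_runLen (y :: rest')).headD 1 := by omega
          obtain ⟨h1, h2⟩ := ih (by simp) k hk
          refine ⟨by simpa using h1, ?_⟩
          simp only [List.getD_cons_succ, List.getD_cons_zero] at h2 ⊢
          rw [h2, hy]; push_cast; ring
      · rw [if_neg hy] at hj
        interval_cases j
        simp

-- chain-maximality of pvB_runLen's head
lemma pv_runLen_head_max (l : List Int) (hl : l ≠ []) :
    (pvB_runLen l).headD 1 = l.length ∨
      ((pvB_runLen l).headD 1 < l.length ∧
        l.getD ((pvB_runLen l).headD 1) 0 ≠ l.getD 0 0 + ((pvB_runLen l).headD 1 : Nat)) := by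
  induction l with
  | nil => simp at hl
  | cons x rest ih =>
    cases rest with
    | nil => left; simp [pvB_runLen]
    | cons y rest' =>
      simp only [pvB_runLen, List.headD_cons]
      by_cases hy : y = x + 1
      · rw [if_pos hy]
        rcases ih (by simp) with h | ⟨h1, h2⟩
        · left; rw [List.length_cons]; omega
        · right
          refine ⟨by simpa using Nat.succ_lt_succ h1, ?_⟩
          simp only [List.getD_cons_succ, List.getD_cons_zero] at h2 ⊢
          intro hc; apply h2
          rw [hc, hy] at *
          push_cast
          push_cast at hc ⊢
          omega
      · rw [if_neg hy]
        right
        refine ⟨by simp, ?_⟩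
        simpa using hy

lemma pv_runLen_tail (x : Int) (rest : List Int) :
    (pvB_runLen (x :: rest)).tail = pvB_runLen rest := by
  cases rest <;> rfl

lemma pv_runLen_ne_nil (x : Int) (rest : List Int) : pvB_runLen (x :: rest) ≠ [] := by
  cases rest <;> simp [pvB_runLen]

lemma pv_runLen_getD (l : List Int) (i : Nat) (hi : i < l.length) :
    (pvB_runLen l).getD i 0 = (pvB_runLen (l.drop i)).headD 1 := by
  induction i generalizing l with
  | zero =>
    cases l with
    | nil => simp at hi
    | cons x rest => cases rest <;> simp [pvB_runLen]
  | succ k ih =>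
    cases l with
    | nil => simp at hi
    | cons x rest =>
      have := ih rest (by simpa using hi)
      rw [List.drop_succ_cons, ← this, ← pv_runLen_tail x rest]
      obtain ⟨c, r, hcr⟩ : ∃ c r, pvB_runLen (x :: rest) = c :: r := by
        rcases h : pvB_runLen (x :: rest) with _ | ⟨c, r⟩
        · exact absurd h (pv_runLen_ne_nil x rest)
        · exact ⟨c, r, rfl⟩
      rw [hcr]; simp

-- A's consecutive-run check equals B's run-length test (under A's own index guard)
lemma pv_consec_eq (pred : List Int) (i : Nat) (fat : Int)
    (hg : (i : Int) + fat ≤ (pred.length : Int) - 1) :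
    ((PySem.List.pyRange 0 fat).all fun j =>
        decide (pred.getD i 0 + j = pred.getD (i + j.toNat) 0))
      = decide (fat ≤ 0 ∨ fat ≤ (((pvB_runLen pred).getD i 0 : Nat) : Int)) := by
  rw [Bool.eq_iff_iff]
  simp only [List.all_eq_true, decide_eq_true_eq, PySem.List.mem_pyRange_one]
  by_cases hfat : fat ≤ 0
  · exact ⟨fun _ => Or.inl hfat, fun _ j hj => ((by omega : False)).elim⟩
  · have hi : i < pred.length := by omega
    set l := pred.drop i with hl
    have hlen : l.length = pred.length - i := by rw [hl]; exact List.length_drop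
    have hlne : l ≠ [] := by
      intro h; rw [h] at hlen; simp at hlen; omega
    have hc : (pvB_runLen pred).getD i 0 = (pvB_runLen l).headD 1 := pv_runLen_getD pred i hi
    have hget : ∀ k : Nat, k < l.length → l.getD k 0 = pred.getD (i + k) 0 := by
      intro k hk
      rw [List.getD_eq_getElem l 0 hk, List.getD_eq_getElem pred 0 (by omega)]
      simp [hl]
    have hget0 : l.getD 0 0 = pred.getD i 0 := by
      have := hget 0 (by omega); simpa using this
    rw [hc]
    constructor
    · intro H
      right
      by_contra hm
      push Not at hm
      rcases pv_runLen_head_max l hlne with h | ⟨h1, h2⟩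
      · omega
      · apply h2
        set m := (pvB_runLen l).headD 1 with hmdef
        have hmf : (m : Int) < fat := hm
        have := H (m : Int) ⟨by positivity, hmf⟩
        rw [Int.toNat_natCast] at this
        rw [hget m h1, hget0]
        omega
    · rintro (h | hle) j ⟨hj0, hjf⟩
      · omega
      · obtain ⟨h1, h2⟩ := pv_runLen_head_sound l hlne j.toNat (by omega)
        rw [hget j.toNat h1, hget0] at h2
        rw [h2]
        omega

-- the two false-alarm counters agree
lemma pv_falseAlarms_eq (pred truth : List Int) (tol fat : Int) :
    pvA_falseAlarms pred truth tol fat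
      = pvB_falseAlarms pred (PySem.List.sorted truth (fun x => x)) (pvB_runLen pred) tol fat := by
  unfold pvA_falseAlarms pvB_falseAlarms
  apply PySem.List.foldl_congr_mem
  intro fa i _
  simp only []
  set t := pred.getD i 0 with ht
  have hcov : (truth.any fun dt => decide (dt - tol ≤ t) && decide (t ≤ dt + tol))
      = pvB_hasInRange (PySem.List.sorted truth (fun x => x)) (t - tol) (t + tol) := by
    rw [pv_hasInRange_sorted]
    have hfun : (fun y : Int => decide (t - tol ≤ y) && decide (y ≤ t + tol))
        = (fun dt : Int => decide (dt - tol ≤ t) && decide (t ≤ dt + tol)) := by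
      funext dt
      rw [← Bool.decide_and, ← Bool.decide_and, decide_eq_decide]
      omega
    rw [hfun]
  rw [hcov]
  by_cases hcv : pvB_hasInRange (PySem.List.sorted truth fun x => x) (t - tol) (t + tol) = true
  · simp [hcv]
  · simp only [hcv, not_false_iff, if_true, Bool.false_eq_true]
    by_cases hg1 : (i : Int) + fat ≤ (pred.length : Int) - 1
    · rw [pv_consec_eq pred i fat hg1]
      by_cases hg2 : fat ≤ 0 ∨ fat ≤ (((pvB_runLen pred).getD i 0 : Nat) : Int)
      · simp [hg1]
      · simp [hg1]
    · simp [hg1]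

-- A's interval loop, rephrased over the suffix it still has to scan
def pvA_f (t0 : Int) : List Int → List (Int × Int)
  | [] => []
  | [_] => []
  | a :: b :: rest =>
    if rest = [] then (if b ≠ a + 1 then [(t0, a), (b, b)] else [(t0, b)])
    else (if b ≠ a + 1 then (t0, a) :: pvA_f b (b :: rest) else pvA_f t0 (b :: rest))

lemma pv_intervalLoop_exit (truth : List Int) (fuel i : Nat) (t0 : Int) (acc : List (Int × Int))
    (h : ¬ i < truth.length - 1) : pvA_intervalLoop truth fuel i t0 acc = acc := by
  cases fuel <;> simp [pvA_intervalLoop, h]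

lemma pv_intervalLoop_eq_f (truth : List Int) :
    ∀ (fuel i : Nat) (t0 : Int) (acc : List (Int × Int)),
      truth.length - 1 ≤ i + fuel → i + 1 < truth.length →
      pvA_intervalLoop truth fuel i t0 acc = acc ++ pvA_f t0 (truth.drop i) := by
  intro fuel
  induction fuel with
  | zero => intro i t0 acc h1 h2; exact ((by omega : False)).elim
  | succ fuel ih =>
    intro i t0 acc h1 h2
    have hcond : i < truth.length - 1 := by omega
    have hia : i < truth.length := by omega
    have hib : i + 1 < truth.length := h2
    have hga : truth.getD i 0 = truth[i] := List.getD_eq_getElem _ _ hia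
    have hgb : truth.getD (i + 1) 0 = truth[i + 1] := List.getD_eq_getElem _ _ hib
    have hdrop : truth.drop i = truth[i] :: truth[i + 1] :: truth.drop (i + 2) := by
      rw [List.drop_eq_getElem_cons hia, List.drop_eq_getElem_cons hib]
    by_cases hlast : i + 1 < truth.length - 1
    · -- not the last iteration: the suffix after i+1 still has ≥ 2 elements
      have hrest : truth.drop (i + 2) ≠ [] := by
        intro hc
        have : (truth.drop (i + 2)).length = truth.length - (i + 2) := List.length_drop
        rw [hc] at this; simp at this; omega
      have hih := fun t0' acc' => ih (i + 1) t0' acc' (by omega) (by omega)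
      have hdrop1 : truth.drop (i + 1) = truth[i + 1] :: truth.drop (i + 2) :=
        List.drop_eq_getElem_cons hib
      by_cases hb : truth.getD (i + 1) 0 ≠ truth.getD i 0 + 1
      · simp only [pvA_intervalLoop, if_pos hcond, if_pos hb, if_neg (not_not_intro hlast)]
        rw [hih, hdrop, hdrop1]
        rw [hga, hgb] at hb
        simp only [pvA_f, if_neg hrest, if_pos hb]
        simp [List.getElem?_eq_getElem hia, List.getElem?_eq_getElem hib]
      · simp only [pvA_intervalLoop, if_pos hcond, if_neg hb, if_neg (not_not_intro hlast)]
        rw [hih, hdrop, hdrop1]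
        rw [hga, hgb] at hb
        simp only [pvA_f, if_neg hrest, if_neg hb]
    · -- last iteration: i + 2 = truth.length
      have hlen2 : truth.length = i + 2 := by omega
      have hrest : truth.drop (i + 2) = [] := List.drop_eq_nil_of_le (by omega)
      have hexit : ∀ t0' acc', pvA_intervalLoop truth fuel (i + 1) t0' acc' = acc' :=
        fun t0' acc' => pv_intervalLoop_exit truth fuel (i + 1) t0' acc' (by omega)
      by_cases hb : truth.getD (i + 1) 0 ≠ truth.getD i 0 + 1
      · simp only [pvA_intervalLoop, if_pos hcond, if_pos hb, if_pos hlast]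
        rw [hexit, hdrop, hrest]
        rw [hga, hgb] at hb
        simp only [pvA_f, if_pos hb]
        simp [List.getElem?_eq_getElem hia, List.getElem?_eq_getElem hib]
      · simp only [pvA_intervalLoop, if_pos hcond, if_neg hb, if_pos hlast]
        rw [hexit, hdrop, hrest]
        rw [hga, hgb] at hb
        simp only [pvA_f, if_neg hb]
        simp [List.getElem?_eq_getElem hib]

lemma pv_f_eq_runsGo (rest : List Int) :
    ∀ (t0 a : Int), rest ≠ [] → pvA_f t0 (a :: rest) = pvB_runsGo t0 a rest := by
  induction rest with
  | nil => intro t0 a h; exact absurd rfl h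
  | cons b rest' ih =>
    intro t0 a _
    cases rest' with
    | nil => by_cases hb : b = a + 1 <;> simp [pvA_f, pvB_runsGo, hb]
    | cons c rest'' =>
      have hne : (c :: rest'' : List Int) ≠ [] := by simp
      by_cases hb : b = a + 1
      · have l1 : pvA_f t0 (a :: b :: c :: rest'') = pvA_f t0 (b :: c :: rest'') := by
          simp [pvA_f, hb]
        have r1 : pvB_runsGo t0 a (b :: c :: rest'') = pvB_runsGo t0 b (c :: rest'') := by
          simp [pvB_runsGo, hb]
        rw [l1, r1, ih t0 b hne]
      · have l1 : pvA_f t0 (a :: b :: c :: rest'') = (t0, a) :: pvA_f b (b :: c :: rest'') := by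
          simp [pvA_f, hb]
        have r1 : pvB_runsGo t0 a (b :: c :: rest'') = (t0, a) :: pvB_runsGo b b (c :: rest'') := by
          simp [pvB_runsGo, hb]
        rw [l1, r1, ih b b hne]

-- the interval lists coincide whenever truth has at least two entries
lemma pv_intervals_eq (x y : Int) (rest : List Int) :
    pvA_intervalLoop (x :: y :: rest) (x :: y :: rest).length 0 ((x :: y :: rest).getD 0 0) []
      = pvB_runs (x :: y :: rest) := by
  rw [pv_intervalLoop_eq_f (x :: y :: rest) (x :: y :: rest).length 0 _ []
      (by simp) (by simp)]
  simp only [List.drop_zero, List.nil_append, List.getD_cons_zero]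
  rw [pv_f_eq_runsGo (y :: rest) x x (by simp)]
  rfl

-- A's per-interval linear scan equals B's binary-search query on sorted(pred)
lemma pv_detect_eq (pred : List Int) (ivs : List (Int × Int)) :
    pvA_detect pred ivs = pvB_count (PySem.List.sorted pred (fun x => x)) ivs := by
  unfold pvA_detect pvB_count
  apply PySem.List.foldl_congr_mem
  intro s iv _
  rw [pv_hasInRange_sorted]

-- same for the non-interval branch
lemma pv_points_eq (pred truth : List Int) (tol : Int) :
    pvA_detectPoints pred truth tol
      = truth.foldl
          (fun s dt =>
            if pvB_hasInRange (PySem.List.sorted pred (fun x => x)) (dt - tol) (dt + tol) then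
              (s.1 + 1, s.2)
            else (s.1, s.2 + 1))
          (0, 0) := by
  unfold pvA_detectPoints
  apply PySem.List.foldl_congr_mem
  intro s dt _
  rw [pv_hasInRange_sorted]

-- ===== VERDICT =====
theorem evaluate_fault_detection_spec : Claim_unchanged_evaluate_fault_detection := by
  intro pred truth tol fat ui _ hpre
  unfold Spec_evaluate_fault_detection
  intro hnd
  unfold evaluate_fault_detection evaluate_fault_detection_alt
  simp only []
  rw [pv_falseAlarms_eq]
  cases ui with
  | false =>
    simp only [if_neg (by simp : ¬ (false = true))]
    rw [pv_points_eq]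
  | true =>
    have hlen : truth.length ≠ 1 := by
      intro h
      exact hnd ⟨rfl, h⟩
    obtain ⟨x, y, rest, hxy⟩ : ∃ x y rest, truth = x :: y :: rest := by
      cases truth with
      | nil => exact absurd rfl hpre
      | cons x rest =>
        cases rest with
        | nil => simp at hlen
        | cons y rest' => exact ⟨x, y, rest', rfl⟩
    subst hxy
    rw [pv_intervals_eq, pv_detect_eq]
    simp

theorem evaluate_fault_detection_changed : Claim_changed_evaluate_fault_detection := by
  unfold Claim_changed_evaluate_fault_detection; decide

theorem evaluate_fault_detection_tight : Claim_exact_evaluate_fault_detection := by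
  intro pred truth tol fat ui _ _ hD heq
  obtain ⟨hui, hlen⟩ := hD
  subst hui
  obtain ⟨x, hx⟩ := List.length_eq_one_iff.mp hlen
  subst hx
  unfold evaluate_fault_detection evaluate_fault_detection_alt at heq
  have hA : pvA_intervalLoop [x] 1 0 x ([] : List (Int × Int)) = [] := rfl
  simp only [pvB_runs, pvB_runsGo, pvB_count, pvA_detect] at heq
  by_cases hc : pvB_hasInRange (PySem.List.sorted pred (fun x => x)) x x = true
  · simp [hc, hA, List.foldl] at heq
  · simp [hc, hA, List.foldl] at heq

def evaluate_fault_detection_raises : Claim_raises_evaluate_fault_detection := by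
  unfold Claim_raises_evaluate_fault_detection
  exact ⟨fun _ _ _ _ _ _ hr hp => hp hr, by decide⟩
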